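-- pv_equiv track=rewrite | github.com/Dakin98/Brain | workspace-ops/scripts/newsletter_phase2_v2.py | analyze_email_type
-- ===== SOURCE A (Python) =====
-- def analyze_email_type(topic_name: str) -> str:
--     """Determine email type from topic name"""
--     topic_lower = topic_name.lower()
--
--     if any(kw in topic_lower for kw in ['sale', 'flash', 'deal', 'discount', 'black friday', 'cyber', 'promo']):
--         return 'sale'
--     elif any(kw in topic_lower for kw in ['review', 'testimonial', 'social proof', 'before & after', 'ugc']):
--         return 'social_proof'
--     elif any(kw in topic_lower for kw in ['tip', 'trick', 'how to', 'guide', 'faq', 'education', 'myth']):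
--         return 'education'
--     elif any(kw in topic_lower for kw in ['product', 'feature', 'best-seller', 'recommended', 'new arrival']):
--         return 'product_showcase'
--     elif any(kw in topic_lower for kw in ['brand', 'mission', 'story', 'founder', 'behind']):
--         return 'brand_story'
--     elif any(kw in topic_lower for kw in ['giveaway', 'contest', 'win']):
--         return 'giveaway'
--     elif any(kw in topic_lower for kw in ['survey', 'feedback', 'quiz']):
--         return 'survey'
--     elif any(kw in topic_lower for kw in ['holiday', 'christmas', 'valentine', 'mother', 'father', 'halloween', 'easter']):
--         return 'holiday'
--     elif any(kw in topic_lower for kw in ['refer', 'friend', 'invite']):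
--         return 'referral'
--     else:
--         return 'newsletter'
-- ===== SOURCE B (Python) =====
-- _KW_LABEL = [
--     ('sale', 'sale'), ('flash', 'sale'), ('deal', 'sale'), ('discount', 'sale'),
--     ('black friday', 'sale'), ('cyber', 'sale'), ('promo', 'sale'),
--     ('review', 'social_proof'), ('testimonial', 'social_proof'),
--     ('social proof', 'social_proof'), ('before & after', 'social_proof'), ('ugc', 'social_proof'),
--     ('tip', 'education'), ('trick', 'education'), ('how to', 'education'),
--     ('guide', 'education'), ('faq', 'education'), ('education', 'education'), ('myth', 'education'),
--     ('product', 'product_showcase'), ('feature', 'product_showcase'),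
--     ('best-seller', 'product_showcase'), ('recommended', 'product_showcase'), ('new arrival', 'product_showcase'),
--     ('brand', 'brand_story'), ('mission', 'brand_story'), ('story', 'brand_story'),
--     ('founder', 'brand_story'), ('behind', 'brand_story'),
--     ('giveaway', 'giveaway'), ('contest', 'giveaway'), ('win', 'giveaway'),
--     ('survey', 'survey'), ('feedback', 'survey'), ('quiz', 'survey'),
--     ('holiday', 'holiday'), ('christmas', 'holiday'), ('valentine', 'holiday'),
--     ('mother', 'holiday'), ('father', 'holiday'), ('halloween', 'holiday'), ('easter', 'holiday'),
--     ('refer', 'referral'), ('friend', 'referral'), ('invite', 'referral'),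
-- ]
--
-- _PRIORITY = ['sale', 'social_proof', 'education', 'product_showcase', 'brand_story',
--              'giveaway', 'survey', 'holiday', 'referral']
--
--
-- def analyze_email_type(topic_name: str) -> str:
--     """Determine email type: scan every position of the lowered topic once,
--     record the label of every keyword starting there, then resolve by priority."""
--     t = topic_name.lower()
--     matched = set()
--     for i in range(len(t) + 1):
--         tail = t[i:]
--         for kw, label in _KW_LABEL:
--             if tail.startswith(kw):
--                 matched.add(label)
--     for label in _PRIORITY:
--         if label in matched:
--             return label
--     return 'newsletter'
-- ===== Notes on version B (the rewrite author's own statement) =====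
-- stated objective: alternative
-- what changed: Instead of searching the topic once per keyword through an if/elif chain, B scans each start position of the lowered topic once, collects into a set the label of every keyword that starts there, and then resolves the collected labels by a final priority pass.
import Mathlib
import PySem

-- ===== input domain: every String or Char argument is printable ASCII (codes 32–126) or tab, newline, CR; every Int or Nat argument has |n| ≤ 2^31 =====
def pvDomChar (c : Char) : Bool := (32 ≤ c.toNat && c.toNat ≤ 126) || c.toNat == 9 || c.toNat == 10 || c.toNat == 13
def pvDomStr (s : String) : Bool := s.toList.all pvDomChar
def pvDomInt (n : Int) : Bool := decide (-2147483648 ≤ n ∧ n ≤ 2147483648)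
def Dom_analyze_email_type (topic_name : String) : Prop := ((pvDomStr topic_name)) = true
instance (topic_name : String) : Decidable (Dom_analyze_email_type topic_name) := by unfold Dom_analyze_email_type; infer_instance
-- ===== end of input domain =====

-- B replaces A's per-keyword substring searches by a single positional scan: it walks every
-- start position of the lowered topic once, records the label of every keyword that starts
-- there into a set, and finally resolves the collected labels by priority (objective: alternative).

-- ===== PORT A =====
def analyze_email_type (topic_name : String) : String :=
  let topic_lower := PySem.Str.lower topic_name
  if ["sale", "flash", "deal", "discount", "black friday", "cyber", "promo"].any
      (fun kw => PySem.Str.isIn kw topic_lower) then "sale"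
  else if ["review", "testimonial", "social proof", "before & after", "ugc"].any
      (fun kw => PySem.Str.isIn kw topic_lower) then "social_proof"
  else if ["tip", "trick", "how to", "guide", "faq", "education", "myth"].any
      (fun kw => PySem.Str.isIn kw topic_lower) then "education"
  else if ["product", "feature", "best-seller", "recommended", "new arrival"].any
      (fun kw => PySem.Str.isIn kw topic_lower) then "product_showcase"
  else if ["brand", "mission", "story", "founder", "behind"].any
      (fun kw => PySem.Str.isIn kw topic_lower) then "brand_story"
  else if ["giveaway", "contest", "win"].any
      (fun kw => PySem.Str.isIn kw topic_lower) then "giveaway"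
  else if ["survey", "feedback", "quiz"].any
      (fun kw => PySem.Str.isIn kw topic_lower) then "survey"
  else if ["holiday", "christmas", "valentine", "mother", "father", "halloween", "easter"].any
      (fun kw => PySem.Str.isIn kw topic_lower) then "holiday"
  else if ["refer", "friend", "invite"].any
      (fun kw => PySem.Str.isIn kw topic_lower) then "referral"
  else "newsletter"

-- ===== PORT B =====
def pvKwLabel : List (String × String) :=
  [ ("sale", "sale"), ("flash", "sale"), ("deal", "sale"), ("discount", "sale"),
    ("black friday", "sale"), ("cyber", "sale"), ("promo", "sale"),
    ("review", "social_proof"), ("testimonial", "social_proof"),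
    ("social proof", "social_proof"), ("before & after", "social_proof"), ("ugc", "social_proof"),
    ("tip", "education"), ("trick", "education"), ("how to", "education"),
    ("guide", "education"), ("faq", "education"), ("education", "education"), ("myth", "education"),
    ("product", "product_showcase"), ("feature", "product_showcase"),
    ("best-seller", "product_showcase"), ("recommended", "product_showcase"), ("new arrival", "product_showcase"),
    ("brand", "brand_story"), ("mission", "brand_story"), ("story", "brand_story"),
    ("founder", "brand_story"), ("behind", "brand_story"),
    ("giveaway", "giveaway"), ("contest", "giveaway"), ("win", "giveaway"),
    ("survey", "survey"), ("feedback", "survey"), ("quiz", "survey"),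
    ("holiday", "holiday"), ("christmas", "holiday"), ("valentine", "holiday"),
    ("mother", "holiday"), ("father", "holiday"), ("halloween", "holiday"), ("easter", "holiday"),
    ("refer", "referral"), ("friend", "referral"), ("invite", "referral") ]

def pvPriority : List String :=
  ["sale", "social_proof", "education", "product_showcase", "brand_story",
   "giveaway", "survey", "holiday", "referral"]

def analyze_email_type_alt (topic_name : String) : String :=
  let t := PySem.Str.lower topic_name
  let matched : PySem.Set String :=
    (PySem.List.pyRange 0 ((PySem.Str.len t : Int) + 1) 1).foldl
      (fun acc i =>
        let tail := PySem.Str.slice t (some i) none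
        pvKwLabel.foldl
          (fun acc2 p => if PySem.Str.startswith tail p.1 then PySem.Set.add acc2 p.2 else acc2)
          acc)
      PySem.Set.empty
  (pvPriority.find? (fun label => PySem.Set.contains matched label)).getD "newsletter"

-- ===== PRECONDITION & SPEC =====
def Spec_analyze_email_type (topic_name : String) (out : String) : Prop := out = analyze_email_type_alt topic_name
instance (topic_name : String) (out : String) : Decidable (Spec_analyze_email_type topic_name out) := by unfold Spec_analyze_email_type; infer_instance

-- ===== CLAIM (what is proved, stated in full; the proofs are below) =====
def Claim_equal_analyze_email_type : Prop := ∀ (topic_name : String), Dom_analyze_email_type topic_name → Spec_analyze_email_type topic_name (analyze_email_type topic_name)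

-- ===== LEMMAS AND PROOFS =====

-- membership in the inner keyword fold (f kept opaque so nothing unfolds)
lemma pv_mem_inner (l : List (String × String)) (f : String → Bool) (acc : PySem.Set String) (x : String) :
    x ∈ l.foldl (fun acc2 p => if f p.1 then PySem.Set.add acc2 p.2 else acc2) acc ↔
      x ∈ acc ∨ ∃ p ∈ l, f p.1 = true ∧ p.2 = x := by
  induction l generalizing acc with
  | nil => simp
  | cons a l ih =>
    simp only [List.foldl_cons]
    by_cases h : f a.1 = true
    · rw [if_pos h, ih]
      simp only [PySem.Set.mem_add, List.mem_cons]
      constructor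
      · rintro ((hx | hx) | ⟨p, hp, hf, hx⟩)
        · exact Or.inl hx
        · exact Or.inr ⟨a, Or.inl rfl, h, hx.symm⟩
        · exact Or.inr ⟨p, Or.inr hp, hf, hx⟩
      · rintro (hx | ⟨p, (rfl | hp), hf, hx⟩)
        · exact Or.inl (Or.inl hx)
        · exact Or.inl (Or.inr hx.symm)
        · exact Or.inr ⟨p, hp, hf, hx⟩
    · rw [if_neg h, ih]
      simp only [List.mem_cons]
      constructor
      · rintro (hx | ⟨p, hp, hf, hx⟩)
        · exact Or.inl hx
        · exact Or.inr ⟨p, Or.inr hp, hf, hx⟩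
      · rintro (hx | ⟨p, (rfl | hp), hf, hx⟩)
        · exact Or.inl hx
        · exact absurd hf h
        · exact Or.inr ⟨p, hp, hf, hx⟩

-- membership in the outer position fold
lemma pv_mem_outer (is : List Int) (l : List (String × String)) (F : Int → String → Bool)
    (acc : PySem.Set String) (x : String) :
    x ∈ is.foldl
        (fun acc i => l.foldl (fun acc2 p => if F i p.1 then PySem.Set.add acc2 p.2 else acc2) acc)
        acc ↔
      x ∈ acc ∨ ∃ i ∈ is, ∃ p ∈ l, F i p.1 = true ∧ p.2 = x := by
  induction is generalizing acc with
  | nil => simp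
  | cons a il ih =>
    simp only [List.foldl_cons, ih, pv_mem_inner, List.mem_cons]
    constructor
    · rintro (⟨(hx | ⟨p, hp, hf, hx⟩)⟩ | ⟨i, hi, p, hp, hf, hx⟩)
      · exact Or.inl hx
      · exact Or.inr ⟨a, Or.inl rfl, p, hp, hf, hx⟩
      · exact Or.inr ⟨i, Or.inr hi, p, hp, hf, hx⟩
    · rintro (hx | ⟨i, (rfl | hi), p, hp, hf, hx⟩)
      · exact Or.inl (Or.inl hx)
      · exact Or.inl (Or.inr ⟨p, hp, hf, hx⟩)
      · exact Or.inr ⟨i, hi, p, hp, hf, hx⟩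

-- a keyword starts at some scanned position iff it is a substring
lemma pv_exists_pos_iff_isIn (t kw : String) :
    (∃ i ∈ PySem.List.pyRange 0 ((PySem.Str.len t : Int) + 1) 1,
        PySem.Str.startswith (PySem.Str.slice t (some i) none) kw = true) ↔
      PySem.Str.isIn kw t = true := by
  constructor
  · rintro ⟨i, hi, hsw⟩
    rw [PySem.List.mem_pyRange_one] at hi
    rw [PySem.Str.isIn_eq, ← PySem.Chars.exists_prefix_drop_iff_isIn]
    refine ⟨i.toNat, ?_⟩
    rw [PySem.Str.startswith_eq, PySem.Chars.startswith_iff] at hsw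
    rwa [PySem.Str.toList_slice, PySem.Chars.slice_eq_listSlice,
      PySem.List.slice_from _ hi.1] at hsw
  · intro h
    rw [PySem.Str.isIn_eq, ← PySem.Chars.exists_prefix_drop_iff_isIn] at h
    obtain ⟨j, hj⟩ := h
    refine ⟨((min j t.toList.length : Nat) : Int), ?_, ?_⟩
    · rw [PySem.List.mem_pyRange_one]
      constructor
      · exact_mod_cast Nat.zero_le _
      · have : min j t.toList.length ≤ t.toList.length := Nat.min_le_right _ _
        rw [PySem.Str.len_eq]
        omega
    · rw [PySem.Str.startswith_eq, PySem.Chars.startswith_iff, PySem.Str.toList_slice,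
        PySem.Chars.slice_eq_listSlice, PySem.List.slice_from _ (by exact_mod_cast Nat.zero_le _),
        Int.toNat_natCast]
      rcases Nat.le_total j t.toList.length with hle | hge
      · rwa [min_eq_left hle]
      · have hnil : t.toList.drop j = [] := List.drop_eq_nil_of_le hge
        have hkw : kw.toList = [] := List.prefix_nil.mp (hnil ▸ hj)
        simp [hkw]

-- a label is collected iff one of its keywords occurs in the topic
lemma pv_mem_matched (t x : String) :
    x ∈ (PySem.List.pyRange 0 ((PySem.Str.len t : Int) + 1) 1).foldl
        (fun acc i =>
          let tail := PySem.Str.slice t (some i) none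
          pvKwLabel.foldl
            (fun acc2 p => if PySem.Str.startswith tail p.1 then PySem.Set.add acc2 p.2 else acc2)
            acc)
        PySem.Set.empty ↔
      ∃ p ∈ pvKwLabel, PySem.Str.isIn p.1 t = true ∧ p.2 = x := by
  rw [pv_mem_outer _ _ (fun i kw => PySem.Str.startswith (PySem.Str.slice t (some i) none) kw)]
  constructor
  · rintro (h | ⟨i, hi, p, hp, hsw, hx⟩)
    · simp [PySem.Set.empty] at h
    · exact ⟨p, hp, (pv_exists_pos_iff_isIn t p.1).mp ⟨i, hi, hsw⟩, hx⟩
  · rintro ⟨p, hp, hin, hx⟩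
    obtain ⟨i, hi, hsw⟩ := (pv_exists_pos_iff_isIn t p.1).mpr hin
    exact Or.inr ⟨i, hi, p, hp, hsw, hx⟩

-- one resolution step of the priority scan
lemma pv_find_step (lab : String) (rest : List String) (m : PySem.Set String) (d : String) :
    (((lab :: rest).find? (fun l => PySem.Set.contains m l)).getD d =
      if PySem.Set.contains m lab then lab
      else ((rest.find? (fun l => PySem.Set.contains m l)).getD d)) := by
  rw [List.find?_cons]
  cases h : PySem.Set.contains m lab <;> simp

-- ===== VERDICT (by name: the statement is the Claim_ definition above) =====
set_option maxHeartbeats 2000000 in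
theorem analyze_email_type_spec : Claim_equal_analyze_email_type := by
  intro topic _
  unfold Spec_analyze_email_type analyze_email_type analyze_email_type_alt
  set t := PySem.Str.lower topic with ht
  set matched :=
    (PySem.List.pyRange 0 ((PySem.Str.len t : Int) + 1) 1).foldl
      (fun acc i =>
        let tail := PySem.Str.slice t (some i) none
        pvKwLabel.foldl
          (fun acc2 p => if PySem.Str.startswith tail p.1 then PySem.Set.add acc2 p.2 else acc2)
          acc)
      PySem.Set.empty with hm
  have hc : ∀ x : String, PySem.Set.contains matched x = true ↔
      ∃ p ∈ pvKwLabel, PySem.Str.isIn p.1 t = true ∧ p.2 = x := by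
    intro x
    rw [PySem.Set.contains_iff, hm, pv_mem_matched]
  have e1 : PySem.Set.contains matched "sale" = (["sale", "flash", "deal", "discount", "black friday", "cyber", "promo"].any fun kw => PySem.Str.isIn kw t) := by
    rw [Bool.eq_iff_iff, hc]
    simp [pvKwLabel]
  have e2 : PySem.Set.contains matched "social_proof" = (["review", "testimonial", "social proof", "before & after", "ugc"].any fun kw => PySem.Str.isIn kw t) := by
    rw [Bool.eq_iff_iff, hc]
    simp [pvKwLabel]
  have e3 : PySem.Set.contains matched "education" = (["tip", "trick", "how to", "guide", "faq", "education", "myth"].any fun kw => PySem.Str.isIn kw t) := by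
    rw [Bool.eq_iff_iff, hc]
    simp [pvKwLabel]
  have e4 : PySem.Set.contains matched "product_showcase" = (["product", "feature", "best-seller", "recommended", "new arrival"].any fun kw => PySem.Str.isIn kw t) := by
    rw [Bool.eq_iff_iff, hc]
    simp [pvKwLabel]
  have e5 : PySem.Set.contains matched "brand_story" = (["brand", "mission", "story", "founder", "behind"].any fun kw => PySem.Str.isIn kw t) := by
    rw [Bool.eq_iff_iff, hc]
    simp [pvKwLabel]
  have e6 : PySem.Set.contains matched "giveaway" = (["giveaway", "contest", "win"].any fun kw => PySem.Str.isIn kw t) := by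
    rw [Bool.eq_iff_iff, hc]
    simp [pvKwLabel]
  have e7 : PySem.Set.contains matched "survey" = (["survey", "feedback", "quiz"].any fun kw => PySem.Str.isIn kw t) := by
    rw [Bool.eq_iff_iff, hc]
    simp [pvKwLabel]
  have e8 : PySem.Set.contains matched "holiday" = (["holiday", "christmas", "valentine", "mother", "father", "halloween", "easter"].any fun kw => PySem.Str.isIn kw t) := by
    rw [Bool.eq_iff_iff, hc]
    simp [pvKwLabel]
  have e9 : PySem.Set.contains matched "referral" = (["refer", "friend", "invite"].any fun kw => PySem.Str.isIn kw t) := by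
    rw [Bool.eq_iff_iff, hc]
    simp [pvKwLabel]
  show _ = ((pvPriority.find? fun label => PySem.Set.contains matched label).getD "newsletter")
  rw [show pvPriority = ["sale", "social_proof", "education", "product_showcase", "brand_story",
      "giveaway", "survey", "holiday", "referral"] from rfl,
    pv_find_step, pv_find_step, pv_find_step, pv_find_step, pv_find_step, pv_find_step,
    pv_find_step, pv_find_step, pv_find_step, e1, e2, e3, e4, e5, e6, e7, e8, e9]
  simp only [List.find?_nil, Option.getD_none]
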